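-- pv_equiv track=rewrite | github.com/iagotito/atal | lista-2/q5.py | cod
-- ===== SOURCE A (Python) =====
-- import math
--
-- def cod(d):
--     if(d == 1 or d == 0):
--         return [d]
--     else:
--         l = cod(math.floor(d/2))
--         l += cod(d%2)
--         l += cod(math.floor(d/2))
--     return l
-- ===== SOURCE B (Python) =====
-- import math
--
-- def cod(d):
--     # Bottom-up: record the chain of halvings, then fold the symmetric list back up.
--     chain = []
--     x = d
--     while x != 0 and x != 1:
--         chain.append(x)
--         x = math.floor(x / 2)
--     res = [x]
--     for v in reversed(chain):
--         res = res + [v % 2] + res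
--     return res
-- ===== Notes on version B (the rewrite author's own statement) =====
-- stated objective: alternative
-- what changed: Replaces the triple recursion (which recomputes cod(d//2) twice at every level) by an iterative bottom-up build: one loop records the halving chain, then the symmetric list is folded up once, reusing each level's list instead of recomputing it.
import Mathlib
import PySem

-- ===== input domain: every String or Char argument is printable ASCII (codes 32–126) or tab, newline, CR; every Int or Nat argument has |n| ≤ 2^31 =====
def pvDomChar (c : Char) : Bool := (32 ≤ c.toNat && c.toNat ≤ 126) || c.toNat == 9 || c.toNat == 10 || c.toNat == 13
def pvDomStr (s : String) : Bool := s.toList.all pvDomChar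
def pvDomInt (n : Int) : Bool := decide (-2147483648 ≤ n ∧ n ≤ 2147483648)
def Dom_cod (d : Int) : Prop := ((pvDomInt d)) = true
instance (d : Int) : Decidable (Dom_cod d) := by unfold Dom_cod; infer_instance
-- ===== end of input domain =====

-- B builds the list bottom-up (halving chain + one fold) instead of A's triple recursion; objective: alternative.
-- Pre_cod requires 0 ≤ d: on negative d, Python A raises RecursionError (and B's while-loop does not terminate).

-- ===== PORT A =====
-- Literal port of A; the 'd < 0' branch only makes the recursion total (Python A raises RecursionError there).
def cod (d : Int) : List Int :=
  if d = 1 ∨ d = 0 then [d]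
  else if d < 0 then []
  else cod (PySem.Int.floordiv d 2) ++ cod (PySem.Int.mod d 2) ++ cod (PySem.Int.floordiv d 2)
termination_by d.toNat
decreasing_by
  · have h2 : 2 ≤ d := by omega
    have := PySem.Int.floordiv_lt_iff_lt_mul (a := d) (q := d) (b := 2) (by omega)
    have := PySem.Int.le_floordiv_iff_mul_le (a := d) (q := 1) (b := 2) (by omega)
    omega
  · have h2 : 2 ≤ d := by omega
    have h0 := PySem.Int.mod_nonneg (a := d) (b := 2) (by omega)
    have h1 := PySem.Int.mod_lt (a := d) (b := 2) (by omega)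
    omega

-- ===== PORT B =====
-- the while-loop of B: returns (chain of recorded x's, final base x).
-- The 'x < 0' branch only makes it total (Python B's loop does not terminate there; outside Pre_cod).
def codChain (x : Int) : List Int × Int :=
  if x = 0 ∨ x = 1 then ([], x)
  else if x < 0 then ([], x)
  else
    let p := codChain (PySem.Int.floordiv x 2)
    (x :: p.1, p.2)
termination_by x.toNat
decreasing_by
  have h2 : 2 ≤ x := by omega
  have := PySem.Int.floordiv_lt_iff_lt_mul (a := x) (q := x) (b := 2) (by omega)
  have := PySem.Int.le_floordiv_iff_mul_le (a := x) (q := 1) (b := 2) (by omega)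
  omega

def cod_alt (d : Int) : List Int :=
  let p := codChain d
  p.1.reverse.foldl (fun res v => res ++ [PySem.Int.mod v 2] ++ res) [p.2]

-- ===== PRECONDITION & SPEC =====
-- Pre_cod: Python A raises RecursionError on every negative d (floor(d/2) never reaches 0 or 1).
def Pre_cod (d : Int) : Prop := 0 ≤ d
instance (d : Int) : Decidable (Pre_cod d) := by unfold Pre_cod; infer_instance
def pvWitness_cod : Int := 6
def Spec_cod (d : Int) (out : List Int) : Prop := out = cod_alt d
instance (d : Int) (out : List Int) : Decidable (Spec_cod d out) := by unfold Spec_cod; infer_instance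

-- ===== CLAIM (what is proved, stated in full; the proofs are below) =====
def Claim_equal_cod : Prop := ∀ (d : Int), Dom_cod d → Pre_cod d → Spec_cod d (cod d)

-- ===== LEMMAS AND PROOFS =====

lemma cod_base (d : Int) (h : d = 1 ∨ d = 0) : cod d = [d] := by
  rw [cod.eq_def]; simp [h]

lemma cod_step (d : Int) (h1 : ¬ (d = 1 ∨ d = 0)) (h2 : 0 ≤ d) :
    cod d = cod (PySem.Int.floordiv d 2) ++ cod (PySem.Int.mod d 2) ++ cod (PySem.Int.floordiv d 2) := by
  rw [cod.eq_def]; simp [h1]; omega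

lemma codChain_base (x : Int) (h : x = 0 ∨ x = 1) : codChain x = ([], x) := by
  rw [codChain.eq_def]; simp [h]

lemma codChain_step (x : Int) (h1 : ¬ (x = 0 ∨ x = 1)) (h2 : 0 ≤ x) :
    codChain x = (x :: (codChain (PySem.Int.floordiv x 2)).1, (codChain (PySem.Int.floordiv x 2)).2) := by
  rw [codChain.eq_def]; simp [h1]; omega

-- the fold over the reversed chain, written as a foldr over the chain
lemma cod_alt_foldr (d : Int) :
    cod_alt d = (codChain d).1.foldr (fun v res => res ++ [PySem.Int.mod v 2] ++ res) [(codChain d).2] := by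
  unfold cod_alt
  rw [List.foldl_reverse]

lemma cod_mod_two (d : Int) (_h2 : 0 ≤ d) (_h1 : ¬ (d = 1 ∨ d = 0)) :
    cod (PySem.Int.mod d 2) = [PySem.Int.mod d 2] := by
  have h0 := PySem.Int.mod_nonneg (a := d) (b := 2) (by omega)
  have hlt := PySem.Int.mod_lt (a := d) (b := 2) (by omega)
  exact cod_base _ (by omega)

lemma cod_eq_alt (n : Nat) : ∀ d : Int, d.toNat = n → 0 ≤ d → cod d = cod_alt d := by
  induction n using Nat.strong_induction_on with
  | _ n ih =>
    intro d hn hd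
    by_cases hb : d = 1 ∨ d = 0
    · rw [cod_base d hb, cod_alt_foldr, codChain_base d (by omega)]
      simp
    · have hfd : 0 ≤ PySem.Int.floordiv d 2 := by
        have := PySem.Int.le_floordiv_iff_mul_le (a := d) (q := 0) (b := 2) (by omega)
        omega
      have hlt : (PySem.Int.floordiv d 2).toNat < n := by
        have := PySem.Int.floordiv_lt_iff_lt_mul (a := d) (q := d) (b := 2) (by omega)
        omega
      have hrec := ih _ hlt (PySem.Int.floordiv d 2) rfl hfd
      rw [cod_step d hb hd, cod_mod_two d hd hb, cod_alt_foldr, codChain_step d (by tauto) hd]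
      simp only [List.foldr_cons]
      rw [← cod_alt_foldr, ← hrec]

-- ===== VERDICT (by name: the statement is the Claim_ definition above) =====
theorem cod_spec : Claim_equal_cod := by
  intro d _ hpre
  unfold Spec_cod
  exact cod_eq_alt d.toNat d rfl hpre
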